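-- pv_equiv track=rewrite | github.com/rammie/advent-of-code | day7.py | count_contents
-- ===== SOURCE A (Python) =====
-- def count_contents(bag, ruleset, memo=None):
--     memo = {} if memo is None else memo
--     if bag in memo:
--         return memo[bag]
--
--     count = 0
--     for num, b in ruleset[bag]:
--         count += num + num * count_contents(b, ruleset, memo)
--
--     memo[bag] = count
--     return count
-- ===== SOURCE B (Python) =====
-- def count_contents(bag, ruleset, memo=None):
--     memo = {} if memo is None else memo
--     if bag in memo:
--         return memo[bag]
--     progress = True
--     while progress and bag not in memo:
--         progress = False
--         for b, rules in ruleset.items():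
--             if b not in memo and all(c in memo for _, c in rules):
--                 memo[b] = sum(n + n * memo[c] for n, c in rules)
--                 progress = True
--     return memo[bag]
-- ===== Notes on version B (the rewrite author's own statement) =====
-- stated objective: alternative
-- what changed: Replaces A's top-down recursive memoized descent with an iterative bottom-up fixed-point: repeated passes over the ruleset resolve every bag whose listed contents are already all resolved, until the queried bag is resolved (the memo short-circuit and the per-edge summation num + num*count(child) are kept).
import Mathlib
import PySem

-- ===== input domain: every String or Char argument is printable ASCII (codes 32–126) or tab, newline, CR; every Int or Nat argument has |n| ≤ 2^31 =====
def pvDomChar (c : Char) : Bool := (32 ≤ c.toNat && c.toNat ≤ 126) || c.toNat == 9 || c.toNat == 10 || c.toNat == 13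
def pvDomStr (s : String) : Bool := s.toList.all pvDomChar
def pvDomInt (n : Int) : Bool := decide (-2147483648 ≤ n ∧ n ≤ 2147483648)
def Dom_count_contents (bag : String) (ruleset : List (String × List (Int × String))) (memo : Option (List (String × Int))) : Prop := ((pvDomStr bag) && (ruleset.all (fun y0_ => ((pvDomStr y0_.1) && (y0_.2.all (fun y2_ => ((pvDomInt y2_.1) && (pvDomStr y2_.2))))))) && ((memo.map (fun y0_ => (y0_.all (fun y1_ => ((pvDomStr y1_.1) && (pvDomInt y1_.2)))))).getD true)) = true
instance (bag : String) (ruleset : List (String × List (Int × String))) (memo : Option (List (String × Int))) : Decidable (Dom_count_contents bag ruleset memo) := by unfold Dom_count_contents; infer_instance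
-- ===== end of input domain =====

-- B replaces A's recursive memoized descent by an iterative bottom-up fixed-point over the ruleset
-- (alternative decomposition, not claimed faster).  Equivalence is about the RETURN value only: both
-- versions mutate the passed-in memo, but B may memoize additional (unreachable) bags.

-- ===== PORT A =====
mutual
def goA (rs : PySem.Dict String (List (Int × String))) (fuel : Nat)
    (m : PySem.Dict String Int) (bag : String) : Option (Int × PySem.Dict String Int) :=
  match fuel with
  | 0 => none
  | fuel' + 1 =>
    match m.get? bag with
    | some v => some (v, m)                      -- if bag in memo: return memo[bag]
    | none =>
      match rs.get? bag with
      | none => none                             -- KeyError: bag not in ruleset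
      | some rules =>
        match goAFold rs fuel' m 0 rules with    -- count = 0; for num, b in ruleset[bag]: ...
        | none => none
        | some (count, m2) => some (count, m2.insert bag count)   -- memo[bag] = count; return count
termination_by (fuel, 0)

def goAFold (rs : PySem.Dict String (List (Int × String))) (fuel : Nat)
    (m : PySem.Dict String Int) (count : Int) (rules : List (Int × String)) :
    Option (Int × PySem.Dict String Int) :=
  match rules with
  | [] => some (count, m)
  | (num, b) :: rest =>
    match goA rs fuel m b with
    | none => none
    | some (v, m2) => goAFold rs fuel m2 (count + num + num * v) rest   -- count += num + num * rec
termination_by (fuel, rules.length + 1)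
end

def count_contents (bag : String) (ruleset : List (String × List (Int × String))) (memo : Option (List (String × Int))) : Int :=
  let rs := PySem.Dict.ofList ruleset
  let m0 := PySem.Dict.ofList (memo.getD [])     -- memo = {} if memo is None else memo
  match goA rs ((memo.getD []).length + ruleset.length + 2) m0 bag with
  | some (v, _) => v
  | none => 0     -- unreachable under Pre_ (Python raises KeyError / RecursionError there)

-- ===== PORT B =====
-- one pass over ruleset.items(): resolve every bag whose listed contents are all resolved
def roundB (rs : PySem.Dict String (List (Int × String))) (m : PySem.Dict String Int) :
    PySem.Dict String Int × Bool :=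
  rs.items.foldl
    (fun st p =>
      if !(st.1.contains p.1) && p.2.all (fun q => st.1.contains q.2) then
        (st.1.insert p.1 (p.2.foldl (fun a q => a + (q.1 + q.1 * st.1.getD q.2 0)) 0), true)
      else st)
    (m, false)

-- while progress and bag not in memo: progress, memo = one more pass
def loopB (rs : PySem.Dict String (List (Int × String))) (bag : String) (fuel : Nat)
    (progress : Bool) (m : PySem.Dict String Int) : PySem.Dict String Int :=
  match fuel with
  | 0 => m
  | fuel' + 1 =>
    if progress && !(m.contains bag) then
      let st := roundB rs m
      loopB rs bag fuel' st.2 st.1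
    else m

def count_contents_alt (bag : String) (ruleset : List (String × List (Int × String))) (memo : Option (List (String × Int))) : Int :=
  let rs := PySem.Dict.ofList ruleset
  let m0 := PySem.Dict.ofList (memo.getD [])     -- memo = {} if memo is None else memo
  match m0.get? bag with
  | some v => v                                  -- if bag in memo: return memo[bag]
  | none =>
    (loopB rs bag ((memo.getD []).length + ruleset.length + 3) true m0).getD bag 0
    -- return memo[bag]; under Pre_ the key is present (Python raises KeyError otherwise)

-- ===== PRECONDITION & SPEC =====
-- Rset n = the bags resolvable within n bottom-up rounds: round 0 is the memo keys, each further
-- round adds the ruleset keys all of whose listed contents are already resolvable.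
def Rset (rs : PySem.Dict String (List (Int × String))) (m0 : PySem.Dict String Int) : Nat → List String
  | 0 => m0.keys
  | n + 1 =>
    let prev := Rset rs m0 n
    prev ++ (rs.keys.filter (fun k => !(prev.contains k) && ((rs.getD k []).all (fun p => prev.contains p.2))))

-- Pre_ holds exactly when Python A returns normally: every bag A's recursion reaches is either
-- memoized or a ruleset key, and the reachable dependencies are acyclic — equivalently, the queried
-- bag becomes resolvable within |memo| + |ruleset| + 1 bottom-up rounds (no KeyError, no RecursionError).
def Pre_count_contents (bag : String) (ruleset : List (String × List (Int × String))) (memo : Option (List (String × Int))) : Prop :=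
  bag ∈ Rset (PySem.Dict.ofList ruleset) (PySem.Dict.ofList (memo.getD []))
      ((memo.getD []).length + ruleset.length + 1)

instance (bag : String) (ruleset : List (String × List (Int × String))) (memo : Option (List (String × Int))) : Decidable (Pre_count_contents bag ruleset memo) := by unfold Pre_count_contents; infer_instance

def pvWitness_count_contents : String × (List (String × List (Int × String))) × (Option (List (String × Int))) :=
  ("shiny gold", [("shiny gold", [(2, "dark red")]), ("dark red", [])], none)

def Spec_count_contents (bag : String) (ruleset : List (String × List (Int × String))) (memo : Option (List (String × Int))) (out : Int) : Prop := out = count_contents_alt bag ruleset memo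
instance (bag : String) (ruleset : List (String × List (Int × String))) (memo : Option (List (String × Int))) (out : Int) : Decidable (Spec_count_contents bag ruleset memo out) := by unfold Spec_count_contents; infer_instance

-- ===== CLAIM (what is proved, stated in full; the proofs are below) =====
def Claim_equal_count_contents : Prop := ∀ (bag : String) (ruleset : List (String × List (Int × String))) (memo : Option (List (String × Int))), Dom_count_contents bag ruleset memo → Pre_count_contents bag ruleset memo → Spec_count_contents bag ruleset memo (count_contents bag ruleset memo)

-- ===== LEMMAS AND PROOFS =====

-- the value A computes for a resolvable bag (fuelled unfolding of the rule sum)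
def Fv (rs : PySem.Dict String (List (Int × String))) (m0 : PySem.Dict String Int) : Nat → String → Int
  | 0, _ => 0
  | n + 1, b =>
    match m0.get? b with
    | some v => v
    | none => (rs.getD b []).foldl (fun a p => a + p.1 + p.1 * Fv rs m0 n p.2) 0

-- invariant of the memo dictionary during either computation
def goodM (rs : PySem.Dict String (List (Int × String))) (m0 : PySem.Dict String Int) (NB : Nat)
    (m : PySem.Dict String Int) : Prop :=
  (∀ x v, m0.get? x = some v → m.get? x = some v) ∧
  (∀ x v, m.get? x = some v → v = Fv rs m0 (NB + 1) x) ∧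
  (∀ x, x ∈ m.keys → x ∈ Rset rs m0 m.size) ∧
  m.keys.Nodup

theorem Rset_succ_sub {rs : PySem.Dict String (List (Int × String))} {m0 : PySem.Dict String Int}
    {n : Nat} : ∀ x ∈ Rset rs m0 n, x ∈ Rset rs m0 (n + 1) := by
  intro x hx
  simp only [Rset]
  exact List.mem_append_left _ hx

theorem Rset_mono {rs : PySem.Dict String (List (Int × String))} {m0 : PySem.Dict String Int}
    {a b : Nat} (h : a ≤ b) : ∀ x ∈ Rset rs m0 a, x ∈ Rset rs m0 b := by
  intro x hx
  induction h with
  | refl => exact hx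
  | step _ ih => exact Rset_succ_sub _ ih

theorem Rset_sub {rs : PySem.Dict String (List (Int × String))} {m0 : PySem.Dict String Int}
    {n : Nat} : ∀ x ∈ Rset rs m0 n, x ∈ m0.keys ++ rs.keys := by
  induction n with
  | zero => intro x hx; simp only [Rset] at hx; exact List.mem_append_left _ hx
  | succ n ih =>
    intro x hx
    simp only [Rset] at hx
    rcases List.mem_append.1 hx with h | h
    · exact ih x h
    · exact List.mem_append_right _ (List.mem_of_mem_filter h)

theorem Rset_cases {rs : PySem.Dict String (List (Int × String))} {m0 : PySem.Dict String Int}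
    {n : Nat} {b : String} (h : b ∈ Rset rs m0 n) :
    b ∈ m0.keys ∨ ((rs.get? b).isSome ∧ ∃ j, j < n ∧ ∀ p ∈ rs.getD b [], p.2 ∈ Rset rs m0 j) := by
  induction n with
  | zero => left; simpa only [Rset] using h
  | succ n ih =>
    simp only [Rset] at h
    rcases List.mem_append.1 h with h | h
    · rcases ih h with h | ⟨hs, j, hj, hc⟩
      · exact Or.inl h
      · exact Or.inr ⟨hs, j, Nat.lt_succ_of_lt hj, hc⟩
    · obtain ⟨hk, hcond⟩ := List.mem_filter.1 h
      simp only [Bool.and_eq_true] at hcond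
      obtain ⟨hnc, hall⟩ := hcond
      refine Or.inr ⟨?_, n, Nat.lt_succ_self n, ?_⟩
      · rw [Option.isSome_iff_ne_none]
        intro h0
        exact (PySem.Dict.get?_eq_none_iff_not_mem_keys rs b).1 h0 hk
      · intro p hp
        have := List.all_eq_true.1 hall p hp
        simpa using this

theorem Rset_intro {rs : PySem.Dict String (List (Int × String))} {m0 : PySem.Dict String Int}
    {n : Nat} {b : String} (hk : b ∈ rs.keys)
    (hc : ∀ p ∈ rs.getD b [], p.2 ∈ Rset rs m0 n) : b ∈ Rset rs m0 (n + 1) := by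
  by_cases hb : b ∈ Rset rs m0 n
  · simp only [Rset]; exact List.mem_append_left _ hb
  · simp only [Rset]
    refine List.mem_append_right _ (List.mem_filter.2 ⟨hk, ?_⟩)
    simp only [Bool.and_eq_true]
    refine ⟨by simpa using hb, List.all_eq_true.2 (fun p hp => by simpa using hc p hp)⟩

theorem Fv_stable {rs : PySem.Dict String (List (Int × String))} {m0 : PySem.Dict String Int} :
    ∀ n b, b ∈ Rset rs m0 n → ∀ j, n ≤ j → Fv rs m0 (j + 1) b = Fv rs m0 (n + 1) b := by
  intro n
  induction n using Nat.strong_induction_on with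
  | _ n ih =>
    intro b hb j hj
    cases h : m0.get? b with
    | some v => simp only [Fv, h]
    | none =>
      rcases Rset_cases hb with hm | ⟨_, j', hj', hc⟩
      · exact absurd hm ((PySem.Dict.get?_eq_none_iff_not_mem_keys m0 b).1 h)
      · simp only [Fv, h]
        apply PySem.List.foldl_congr_mem
        intro acc p hp
        obtain ⟨jj, rfl⟩ : ∃ jj, j = jj + 1 := ⟨j - 1, by omega⟩
        obtain ⟨nn, rfl⟩ : ∃ nn, n = nn + 1 := ⟨n - 1, by omega⟩
        rw [ih j' hj' p.2 (hc p hp) jj (by omega), ih j' hj' p.2 (hc p hp) nn (by omega)]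

theorem F_unfold {rs : PySem.Dict String (List (Int × String))} {m0 : PySem.Dict String Int}
    {NB n : Nat} {b : String} {rules : List (Int × String)}
    (hb : b ∈ Rset rs m0 n) (hm : m0.get? b = none) (hn : n ≤ NB) (hr : rs.get? b = some rules) :
    Fv rs m0 (NB + 1) b = rules.foldl (fun a p => a + p.1 + p.1 * Fv rs m0 (NB + 1) p.2) 0 := by
  have hgd : rs.getD b [] = rules := by
    rw [PySem.Dict.getD_eq_get?_getD, hr]; rfl
  rcases Rset_cases hb with hmem | ⟨_, j', hj', hc⟩
  · exact absurd hmem ((PySem.Dict.get?_eq_none_iff_not_mem_keys m0 b).1 hm)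
  · have h1 : Fv rs m0 (NB + 1) b
        = rules.foldl (fun a p => a + p.1 + p.1 * Fv rs m0 NB p.2) 0 := by
      simp only [Fv, hm, hgd]
    rw [h1]
    apply PySem.List.foldl_congr_mem
    intro acc p hp
    have hp' : p ∈ rs.getD b [] := by rw [hgd]; exact hp
    obtain ⟨nb, rfl⟩ : ∃ nb, NB = nb + 1 := ⟨NB - 1, by omega⟩
    rw [Fv_stable j' p.2 (hc p hp') nb (by omega),
        Fv_stable j' p.2 (hc p hp') (nb + 1) (by omega)]

theorem good_size {rs : PySem.Dict String (List (Int × String))} {m0 : PySem.Dict String Int}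
    {NB : Nat} {m : PySem.Dict String Int} (h : goodM rs m0 NB m) :
    m.size ≤ m0.size + rs.size := by
  obtain ⟨_, _, h3, h4⟩ := h
  have hsub : ∀ x ∈ m.keys, x ∈ m0.keys ++ rs.keys := fun x hx => Rset_sub x (h3 x hx)
  have hsz : m.size = m.keys.length := by
    simp [PySem.Dict.size, PySem.Dict.keys]
  have hsz0 : m0.size = m0.keys.length := by
    simp [PySem.Dict.size, PySem.Dict.keys]
  have hszr : rs.size = rs.keys.length := by
    simp [PySem.Dict.size, PySem.Dict.keys]
  have hlen : m.keys.length ≤ (m0.keys ++ rs.keys).length := by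
    calc m.keys.length = m.keys.toFinset.card := (List.toFinset_card_of_nodup h4).symm
      _ ≤ (m0.keys ++ rs.keys).toFinset.card := by
          apply Finset.card_le_card
          intro x hx
          rw [List.mem_toFinset] at hx ⊢
          exact hsub x hx
      _ ≤ (m0.keys ++ rs.keys).length := List.toFinset_card_le _
  rw [hsz, hsz0, hszr]
  simpa using hlen

theorem good_m0 {rs : PySem.Dict String (List (Int × String))} {m0 : PySem.Dict String Int}
    {NB : Nat} (h : m0.keys.Nodup) : goodM rs m0 NB m0 := by
  refine ⟨fun x v hv => hv, fun x v hv => by simp [Fv, hv], fun x hx => ?_, h⟩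
  exact Rset_mono (Nat.zero_le _) x (by simpa only [Rset] using hx)

theorem goA_main {rs : PySem.Dict String (List (Int × String))} {m0 : PySem.Dict String Int}
    {NB : Nat} :
    ∀ n, n ≤ NB → ∀ b m, b ∈ Rset rs m0 n → goodM rs m0 NB m →
    ∃ m', goodM rs m0 NB m' ∧ (∀ x v, m.get? x = some v → m'.get? x = some v) ∧
      m'.get? b = some (Fv rs m0 (NB + 1) b) ∧
      ∀ fuel, n + 1 ≤ fuel → goA rs fuel m b = some (Fv rs m0 (NB + 1) b, m') := by
  intro n
  induction n using Nat.strong_induction_on with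
  | _ n ih =>
    intro hnNB b m hb hm
    cases hmb : m.get? b with
    | some v =>
      have hv : v = Fv rs m0 (NB + 1) b := hm.2.1 b v hmb
      refine ⟨m, hm, fun x v h => h, by rw [hmb, hv], ?_⟩
      intro fuel hf
      obtain ⟨f, rfl⟩ : ∃ f, fuel = f + 1 := ⟨fuel - 1, by omega⟩
      simp only [goA, hmb, hv]
    | none =>
      have hm0b : m0.get? b = none := by
        cases h0 : m0.get? b with
        | none => rfl
        | some w =>
          have := hm.1 b w h0
          rw [hmb] at this
          cases this
      rcases Rset_cases hb with hmem | ⟨hs, j, hj, hc⟩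
      · exact absurd hmem ((PySem.Dict.get?_eq_none_iff_not_mem_keys m0 b).1 hm0b)
      · obtain ⟨rules, hr⟩ := Option.isSome_iff_exists.1 hs
        have hgd : rs.getD b [] = rules := by
          rw [PySem.Dict.getD_eq_get?_getD, hr]; rfl
        have hcrules : ∀ p ∈ rules, p.2 ∈ Rset rs m0 j := by
          rw [← hgd]; exact hc
        have hfold : ∀ (l : List (Int × String)), (∀ p ∈ l, p.2 ∈ Rset rs m0 j) →
            ∀ m₁ count, goodM rs m0 NB m₁ →
            ∃ m₂, goodM rs m0 NB m₂ ∧ (∀ x v, m₁.get? x = some v → m₂.get? x = some v) ∧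
              (∀ p ∈ l, ∃ w, m₂.get? p.2 = some w) ∧
              ∀ fuel, j + 1 ≤ fuel → goAFold rs fuel m₁ count l
                = some (l.foldl (fun a p => a + p.1 + p.1 * Fv rs m0 (NB + 1) p.2) count, m₂) := by
          intro l
          induction l with
          | nil =>
            intro _ m₁ count h₁
            exact ⟨m₁, h₁, fun x v h => h, by simp, fun fuel _ => by simp [goAFold]⟩
          | cons p rest ihl =>
            obtain ⟨num, c⟩ := p
            intro hl m₁ count h₁
            obtain ⟨m₂, h₂, hext₂, hget₂, hrunA⟩ :=
              ih j hj (by omega) c m₁ (hl (num, c) (List.mem_cons_self)) h₁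
            obtain ⟨m₃, h₃, hext₃, hrest₃, hrunF⟩ :=
              ihl (fun q hq => hl q (List.mem_cons_of_mem _ hq)) m₂
                (count + num + num * Fv rs m0 (NB + 1) c) h₂
            refine ⟨m₃, h₃, fun x v h => hext₃ x v (hext₂ x v h), ?_, ?_⟩
            · intro q hq
              rcases List.mem_cons.1 hq with rfl | hq'
              · exact ⟨Fv rs m0 (NB + 1) c, hext₃ _ _ hget₂⟩
              · exact hrest₃ q hq'
            · intro fuel hf
              simp only [goAFold]
              rw [hrunA fuel hf]
              dsimp only
              rw [hrunF fuel hf]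
              simp
        obtain ⟨m₂, h₂, hext₂, hall₂, hrunF⟩ := hfold rules hcrules m 0 hm
        have hcount : rules.foldl (fun a p => a + p.1 + p.1 * Fv rs m0 (NB + 1) p.2) 0
            = Fv rs m0 (NB + 1) b := (F_unfold hb hm0b hnNB hr).symm
        have hbkeys : b ∈ rs.keys := by
          by_contra hk
          rw [← PySem.Dict.get?_eq_none_iff_not_mem_keys] at hk
          rw [hk] at hr; cases hr
        refine ⟨m₂.insert b (Fv rs m0 (NB + 1) b), ⟨?_, ?_, ?_, ?_⟩, ?_, ?_, ?_⟩
        · intro x v h0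
          rw [PySem.Dict.get?_insert]
          split
          · next hxb => rw [hxb] at h0; rw [h0] at hm0b; cases hm0b
          · exact h₂.1 x v h0
        · intro x v h0
          rw [PySem.Dict.get?_insert] at h0
          split at h0
          · next hxb => rw [hxb]; cases h0; rfl
          · exact h₂.2.1 x v h0
        · intro x hx
          rcases (PySem.Dict.mem_keys_insert m₂ b x (Fv rs m0 (NB + 1) b)).1 hx with rfl | hx'
          · cases hbm : m₂.contains x with
            | true =>
              rw [PySem.Dict.size_insert, if_pos hbm]
              exact h₂.2.2.1 x ((PySem.Dict.contains_iff_mem_keys m₂ x).1 hbm)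
            | false =>
              rw [PySem.Dict.size_insert, if_neg (by simp [hbm])]
              apply Rset_intro hbkeys
              intro p hp
              rw [hgd] at hp
              obtain ⟨w, hw⟩ := hall₂ p hp
              have hpk : p.2 ∈ m₂.keys := by
                by_contra hk
                rw [← PySem.Dict.get?_eq_none_iff_not_mem_keys] at hk
                rw [hk] at hw; cases hw
              exact h₂.2.2.1 p.2 hpk
          · cases hbm : m₂.contains b with
            | true =>
              rw [PySem.Dict.size_insert, if_pos hbm]
              exact h₂.2.2.1 x hx'
            | false =>
              rw [PySem.Dict.size_insert, if_neg (by simp [hbm])]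
              exact Rset_mono (Nat.le_succ _) x (h₂.2.2.1 x hx')
        · exact PySem.Dict.nodup_keys_insert m₂ b _ h₂.2.2.2
        · intro x v h0
          rw [PySem.Dict.get?_insert]
          split
          · next hxb =>
            rw [hxb, hmb] at h0
            cases h0
          · exact hext₂ x v h0
        · rw [PySem.Dict.get?_insert, if_pos rfl]
        · intro fuel hf
          obtain ⟨f, rfl⟩ : ∃ f, fuel = f + 1 := ⟨fuel - 1, by omega⟩
          simp only [goA, hmb, hr]
          rw [hrunF f (by omega), hcount]

theorem size_ofList_le {κ ν : Type} [BEq κ] (l : List (κ × ν)) :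
    (PySem.Dict.ofList l).size ≤ l.length := by
  have h : ∀ (l : List (κ × ν)) (d : PySem.Dict κ ν),
      (l.foldl (fun d p => d.insert p.1 p.2) d).size ≤ d.size + l.length := by
    intro l
    induction l with
    | nil => intro d; simp
    | cons p tl ih =>
      intro d
      calc (List.foldl (fun d p => d.insert p.1 p.2) (d.insert p.1 p.2) tl).size
          ≤ (d.insert p.1 p.2).size + tl.length := ih _
        _ ≤ d.size + (tl.length + 1) := by rw [PySem.Dict.size_insert]; split <;> omega
        _ = d.size + (p :: tl).length := by simp
  simpa [PySem.Dict.ofList] using h l PySem.Dict.empty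

theorem ext_insert {m : PySem.Dict String Int} {b : String} (w : Int)
    (hmb : m.get? b = none) :
    ∀ x v, m.get? x = some v → (m.insert b w).get? x = some v := by
  intro x v h
  rw [PySem.Dict.get?_insert]
  split
  · next hxb => rw [hxb, hmb] at h; cases h
  · exact h

theorem contains_persist {m m' : PySem.Dict String Int}
    (hext : ∀ x v, m.get? x = some v → m'.get? x = some v) {x : String}
    (h : m.contains x = true) : m'.contains x = true := by
  rw [PySem.Dict.contains_eq_isSome_get?] at h ⊢
  obtain ⟨v, hv⟩ := Option.isSome_iff_exists.1 h
  rw [hext x v hv]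
  rfl

theorem mem_keys_of_contains {m : PySem.Dict String Int} {x : String}
    (h : m.contains x = true) : ∃ w, m.get? x = some w ∧ x ∈ m.keys := by
  rw [PySem.Dict.contains_eq_isSome_get?] at h
  obtain ⟨v, hv⟩ := Option.isSome_iff_exists.1 h
  exact ⟨v, hv, by
    by_contra hk
    rw [← PySem.Dict.get?_eq_none_iff_not_mem_keys] at hk
    rw [hk] at hv; cases hv⟩

theorem good_insert {rs : PySem.Dict String (List (Int × String))} {m0 : PySem.Dict String Int}
    {NB : Nat} (hNB : m0.size + rs.size + 1 ≤ NB) {m : PySem.Dict String Int}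
    {b : String} {rules : List (Int × String)}
    (h : goodM rs m0 NB m) (hr : rs.get? b = some rules) (hmb : m.get? b = none)
    (hch : ∀ p ∈ rules, m.contains p.2 = true) :
    goodM rs m0 NB (m.insert b (rules.foldl (fun a p => a + p.1 + p.1 * Fv rs m0 (NB + 1) p.2) 0)) ∧
    rules.foldl (fun a p => a + p.1 + p.1 * Fv rs m0 (NB + 1) p.2) 0 = Fv rs m0 (NB + 1) b := by
  have hbkeys : b ∈ rs.keys := by
    by_contra hk
    rw [← PySem.Dict.get?_eq_none_iff_not_mem_keys] at hk
    rw [hk] at hr; cases hr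
  have hgd : rs.getD b [] = rules := by
    rw [PySem.Dict.getD_eq_get?_getD, hr]; rfl
  have hm0b : m0.get? b = none := by
    cases h0 : m0.get? b with
    | none => rfl
    | some w => have := h.1 b w h0; rw [hmb] at this; cases this
  have hbR : b ∈ Rset rs m0 (m.size + 1) := by
    apply Rset_intro hbkeys
    intro p hp
    rw [hgd] at hp
    obtain ⟨w, _, hpk⟩ := mem_keys_of_contains (hch p hp)
    exact h.2.2.1 p.2 hpk
  have hszn : m.size + 1 ≤ NB := by have := good_size h; omega
  have hFv : rules.foldl (fun a p => a + p.1 + p.1 * Fv rs m0 (NB + 1) p.2) 0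
      = Fv rs m0 (NB + 1) b := (F_unfold hbR hm0b hszn hr).symm
  rw [hFv]
  refine ⟨⟨?_, ?_, ?_, PySem.Dict.nodup_keys_insert m b _ h.2.2.2⟩, rfl⟩
  · intro x v h0
    rw [PySem.Dict.get?_insert]
    split
    · next hxb => rw [hxb] at h0; rw [h0] at hm0b; cases hm0b
    · exact h.1 x v h0
  · intro x v h0
    rw [PySem.Dict.get?_insert] at h0
    split at h0
    · next hxb => rw [hxb]; cases h0; rfl
    · exact h.2.1 x v h0
  · intro x hx
    have hcbf : m.contains b = false := by
      rw [PySem.Dict.contains_eq_isSome_get?, hmb]; rfl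
    rcases (PySem.Dict.mem_keys_insert m b x _).1 hx with rfl | hx'
    · rw [PySem.Dict.size_insert, if_neg (by simp [hcbf])]
      exact hbR
    · rw [PySem.Dict.size_insert, if_neg (by simp [hcbf])]
      exact Rset_mono (Nat.le_succ _) x (h.2.2.1 x hx')

theorem roundB_main {rs : PySem.Dict String (List (Int × String))} {m0 : PySem.Dict String Int}
    {NB : Nat} (hNB : m0.size + rs.size + 1 ≤ NB) (hrs : rs.keys.Nodup)
    {m : PySem.Dict String Int} (hm : goodM rs m0 NB m) :
    goodM rs m0 NB (roundB rs m).1 ∧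
    (∀ x v, m.get? x = some v → (roundB rs m).1.get? x = some v) ∧
    (∀ b rules, rs.get? b = some rules → (∀ p ∈ rules, m.contains p.2 = true) →
      (roundB rs m).1.contains b = true) ∧
    ((roundB rs m).2 = false → (roundB rs m).1 = m) := by
  have key : ∀ (l : List (String × List (Int × String))), (∀ q ∈ l, q ∈ rs.items) →
      ∀ st : PySem.Dict String Int × Bool, goodM rs m0 NB st.1 →
      goodM rs m0 NB (l.foldl (fun (st : PySem.Dict String Int × Bool) (p : String × List (Int × String)) =>
            if !(st.1.contains p.1) && p.2.all (fun q => st.1.contains q.2) then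
              (st.1.insert p.1 (p.2.foldl (fun a q => a + (q.1 + q.1 * st.1.getD q.2 0)) 0), true)
            else st) st).1 ∧
      (∀ x v, st.1.get? x = some v → (l.foldl (fun (st : PySem.Dict String Int × Bool) (p : String × List (Int × String)) =>
            if !(st.1.contains p.1) && p.2.all (fun q => st.1.contains q.2) then
              (st.1.insert p.1 (p.2.foldl (fun a q => a + (q.1 + q.1 * st.1.getD q.2 0)) 0), true)
            else st) st).1.get? x = some v) ∧
      (∀ q ∈ l, (∀ p ∈ q.2, st.1.contains p.2 = true) → (l.foldl (fun (st : PySem.Dict String Int × Bool) (p : String × List (Int × String)) =>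
            if !(st.1.contains p.1) && p.2.all (fun q => st.1.contains q.2) then
              (st.1.insert p.1 (p.2.foldl (fun a q => a + (q.1 + q.1 * st.1.getD q.2 0)) 0), true)
            else st) st).1.contains q.1 = true) ∧
      ((l.foldl (fun (st : PySem.Dict String Int × Bool) (p : String × List (Int × String)) =>
            if !(st.1.contains p.1) && p.2.all (fun q => st.1.contains q.2) then
              (st.1.insert p.1 (p.2.foldl (fun a q => a + (q.1 + q.1 * st.1.getD q.2 0)) 0), true)
            else st) st).2 = false → (l.foldl (fun (st : PySem.Dict String Int × Bool) (p : String × List (Int × String)) =>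
            if !(st.1.contains p.1) && p.2.all (fun q => st.1.contains q.2) then
              (st.1.insert p.1 (p.2.foldl (fun a q => a + (q.1 + q.1 * st.1.getD q.2 0)) 0), true)
            else st) st).1 = st.1 ∧ st.2 = false) := by
    intro l
    induction l with
    | nil =>
      intro _ st hst
      exact ⟨hst, fun x v h => h, by simp, fun h => ⟨rfl, h⟩⟩
    | cons q tl ihl =>
      intro hl st hst
      obtain ⟨b, rules⟩ := q
      have hq : (b, rules) ∈ rs.items := hl _ List.mem_cons_self
      have hrb : rs.get? b = some rules := PySem.Dict.get?_of_mem_items rs hq hrs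
      rw [List.foldl_cons]
      cases hcond : (!(st.1.contains b) && rules.all (fun q => st.1.contains q.2)) with
      | false =>
        rw [if_neg (by simp)]
        obtain ⟨hg', he', ha', hf'⟩ := ihl (fun q hq' => hl q (List.mem_cons_of_mem _ hq')) st hst
        refine ⟨hg', he', ?_, hf'⟩
        intro q' hq' hcont
        rcases List.mem_cons.1 hq' with rfl | hq''
        · have hallc : (rules.all fun q => st.1.contains q.2) = true :=
            List.all_eq_true.2 hcont
          have hcb : st.1.contains b = true := by
            by_contra hcb0
            have hcb' : st.1.contains b = false := by
              cases h0 : st.1.contains b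
              · rfl
              · exact absurd h0 hcb0
            rw [hcb', hallc] at hcond
            cases hcond
          exact contains_persist he' hcb
        · exact ha' q' hq'' hcont
      | true =>
        rw [if_pos rfl]
        simp only [Bool.and_eq_true, Bool.not_eq_true'] at hcond
        obtain ⟨hcb, hall⟩ := hcond
        have hmb : st.1.get? b = none := by
          rw [PySem.Dict.contains_eq_isSome_get?] at hcb
          cases h0 : st.1.get? b
          · rfl
          · rw [h0] at hcb; cases hcb
        have hch : ∀ p ∈ rules, st.1.contains p.2 = true :=
          fun p hp => List.all_eq_true.1 hall p hp
        have hval : rules.foldl (fun a q => a + (q.1 + q.1 * st.1.getD q.2 0)) 0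
            = rules.foldl (fun a p => a + p.1 + p.1 * Fv rs m0 (NB + 1) p.2) 0 := by
          apply PySem.List.foldl_congr_mem
          intro acc p hp
          obtain ⟨w, hw, _⟩ := mem_keys_of_contains (hch p hp)
          have hwv : w = Fv rs m0 (NB + 1) p.2 := hst.2.1 p.2 w hw
          rw [PySem.Dict.getD_eq_get?_getD, hw, Option.getD_some, hwv]
          ring
        obtain ⟨hgi, _⟩ := good_insert hNB hst hrb hmb hch
        rw [hval]
        obtain ⟨hg', he', ha', hf'⟩ :=
          ihl (fun q hq' => hl q (List.mem_cons_of_mem _ hq'))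
            (st.1.insert b (rules.foldl (fun a p => a + p.1 + p.1 * Fv rs m0 (NB + 1) p.2) 0), true)
            hgi
        refine ⟨hg', fun x v h => he' x v (ext_insert _ hmb x v h), ?_, ?_⟩
        · intro q' hq' hcont
          rcases List.mem_cons.1 hq' with rfl | hq''
          · exact contains_persist he' (by
              rw [PySem.Dict.contains_eq_isSome_get?, PySem.Dict.get?_insert, if_pos rfl]; rfl)
          · apply ha' q' hq''
            intro p hp
            apply contains_persist (ext_insert _ hmb)
            exact hcont p hp
        · intro hfalse
          obtain ⟨_, h2⟩ := hf' hfalse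
          cases h2
  obtain ⟨hg, he, ha, hf⟩ := key rs.items (fun q hq => hq) (m, false) hm
  refine ⟨hg, he, ?_, fun h => (hf h).1⟩
  intro b rules hrb hcont
  have hq : (b, rules) ∈ rs.items := PySem.Dict.mem_items_of_get?_eq_some rs hrb
  exact ha (b, rules) hq hcont

theorem loopB_main {rs : PySem.Dict String (List (Int × String))} {m0 : PySem.Dict String Int}
    {NB K : Nat} (hNB : m0.size + rs.size + 1 ≤ NB) (hrs : rs.keys.Nodup)
    {bag : String} (hbag : bag ∈ Rset rs m0 K) :
    ∀ fuel j m, goodM rs m0 NB m → (∀ x ∈ Rset rs m0 j, m.contains x = true) →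
      K + 1 ≤ j + fuel →
      (loopB rs bag fuel true m).get? bag = some (Fv rs m0 (NB + 1) bag) := by
  intro fuel
  induction fuel with
  | zero =>
    intro j m hg hcont hK
    have hbj : bag ∈ Rset rs m0 j := Rset_mono (by omega) bag hbag
    obtain ⟨w, hw, _⟩ := mem_keys_of_contains (hcont bag hbj)
    have hwv : w = Fv rs m0 (NB + 1) bag := hg.2.1 bag w hw
    simp only [loopB]
    rw [hw, hwv]
  | succ fuel ihf =>
    intro j m hg hcont hK
    simp only [loopB]
    cases hcb : m.contains bag with
    | true =>
      simp only [Bool.not_true, Bool.and_false]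
      obtain ⟨w, hw, _⟩ := mem_keys_of_contains hcb
      have hwv : w = Fv rs m0 (NB + 1) bag := hg.2.1 bag w hw
      simp only [Bool.false_eq_true, if_false]
      rw [hw, hwv]
    | false =>
      simp only [Bool.not_false, Bool.and_true, if_true]
      obtain ⟨hg', he', ha', hf'⟩ := roundB_main hNB hrs hg
      -- one pass resolves every bag addable from a level all of whose members are memoized
      have hstep : ∀ (jj : Nat), (∀ x ∈ Rset rs m0 jj, m.contains x = true) →
          ∀ x ∈ Rset rs m0 (jj + 1), (roundB rs m).1.contains x = true := by
        intro jj hcj x hx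
        simp only [Rset] at hx
        rcases List.mem_append.1 hx with h | h
        · exact contains_persist he' (hcj x h)
        · obtain ⟨hxk, hcondx⟩ := List.mem_filter.1 h
          simp only [Bool.and_eq_true] at hcondx
          obtain ⟨-, hallx⟩ := hcondx
          obtain ⟨rulesx, hrx⟩ : ∃ r, rs.get? x = some r := by
            cases h0 : rs.get? x with
            | none => exact absurd hxk ((PySem.Dict.get?_eq_none_iff_not_mem_keys rs x).1 h0)
            | some r => exact ⟨r, rfl⟩
          have hgdx : rs.getD x [] = rulesx := by
            rw [PySem.Dict.getD_eq_get?_getD, hrx]; rfl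
          apply ha' x rulesx hrx
          intro p hp
          have hpj : p.2 ∈ Rset rs m0 jj := by
            have := List.all_eq_true.1 hallx p (by rw [hgdx]; exact hp)
            simpa using this
          exact hcj p.2 hpj
      cases hch : (roundB rs m).2 with
      | true =>
        exact ihf (j + 1) (roundB rs m).1 hg' (hstep j hcont) (by omega)
      | false =>
        have hmeq : (roundB rs m).1 = m := hf' hch
        have hclosed : ∀ i, ∀ x ∈ Rset rs m0 (j + i), m.contains x = true := by
          intro i
          induction i with
          | zero => simpa using hcont
          | succ i ihi =>
            intro x hx
            rw [← hmeq]
            exact hstep (j + i) ihi x (by rw [Nat.add_succ] at hx; exact hx)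
        have hbm : m.contains bag = true :=
          hclosed K bag (Rset_mono (by omega) bag hbag)
        rw [hbm] at hcb
        cases hcb

-- ===== VERDICT (by name: the statement is the Claim_ definition above) =====
theorem count_contents_spec : Claim_equal_count_contents := by
  intro bag ruleset memo _hdom hpre
  unfold Spec_count_contents
  unfold Pre_count_contents at hpre
  have hrsn : (PySem.Dict.ofList ruleset).keys.Nodup := PySem.Dict.nodup_keys_ofList _
  have hm0n : (PySem.Dict.ofList (memo.getD [])).keys.Nodup := PySem.Dict.nodup_keys_ofList _
  have hNB : (PySem.Dict.ofList (memo.getD [])).size + (PySem.Dict.ofList ruleset).size + 1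
      ≤ (memo.getD []).length + ruleset.length + 1 := by
    have h1 := size_ofList_le (memo.getD [])
    have h2 := size_ofList_le ruleset
    omega
  obtain ⟨mA, _, _, _, hrunA⟩ :=
    goA_main (rs := PySem.Dict.ofList ruleset) (m0 := PySem.Dict.ofList (memo.getD []))
      (NB := (memo.getD []).length + ruleset.length + 1)
      ((memo.getD []).length + ruleset.length + 1) le_rfl bag
      (PySem.Dict.ofList (memo.getD [])) hpre (good_m0 hm0n)
  have hA : count_contents bag ruleset memo
      = Fv (PySem.Dict.ofList ruleset) (PySem.Dict.ofList (memo.getD []))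
          ((memo.getD []).length + ruleset.length + 1 + 1) bag := by
    simp only [count_contents]
    rw [hrunA ((memo.getD []).length + ruleset.length + 2) (by omega)]
  have hB : count_contents_alt bag ruleset memo
      = Fv (PySem.Dict.ofList ruleset) (PySem.Dict.ofList (memo.getD []))
          ((memo.getD []).length + ruleset.length + 1 + 1) bag := by
    simp only [count_contents_alt]
    cases h0 : (PySem.Dict.ofList (memo.getD [])).get? bag with
    | some v =>
      dsimp only
      exact (good_m0 hm0n).2.1 bag v h0
    | none =>
      dsimp only
      have hrun := loopB_main (NB := (memo.getD []).length + ruleset.length + 1)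
        (K := (memo.getD []).length + ruleset.length + 1) hNB hrsn hpre
        ((memo.getD []).length + ruleset.length + 3) 0 (PySem.Dict.ofList (memo.getD []))
        (good_m0 hm0n)
        (by
          intro x hx
          rw [PySem.Dict.contains_iff_mem_keys]
          simpa only [Rset] using hx)
        (by omega)
      rw [PySem.Dict.getD_eq_get?_getD, hrun, Option.getD_some]
  rw [hA, hB]
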